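-- pv_equiv track=rewrite | github.com/markus-michalski/storyforge | tools/shared/gate_result.py | aggregate_status
-- ===== SOURCE A (Python) =====
-- from typing import Any, Iterable, Literal, Mapping
--
-- GateStatus = Literal["PASS", "WARN", "FAIL"]
--
-- _STATUS_RANK: dict[str, int] = {"PASS": 0, "WARN": 1, "FAIL": 2}
--
-- _RANK_TO_STATUS: dict[int, GateStatus] = {0: "PASS", 1: "WARN", 2: "FAIL"}
--
-- def aggregate_status(statuses: Iterable[str]) -> GateStatus:
--     """Return the worst status across ``statuses`` (FAIL > WARN > PASS).
--
--     An empty iterable returns ``"PASS"``.  Unknown values are skipped — they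
--     do not silently degrade the verdict.
--     """
--     worst = 0
--     for raw in statuses:
--         rank = _STATUS_RANK.get(str(raw).upper())
--         if rank is None:
--             continue
--         if rank > worst:
--             worst = rank
--     return _RANK_TO_STATUS[worst]
-- ===== SOURCE B (Python) =====
-- def aggregate_status(statuses):
--     """Return the worst status across ``statuses`` (FAIL > WARN > PASS)."""
--     s = {str(r).upper() for r in statuses}
--     if "FAIL" in s:
--         return "FAIL"
--     if "WARN" in s:
--         return "WARN"
--     return "PASS"
-- ===== Notes on version B (the rewrite author's own statement) =====
-- stated objective: idiomatic
-- what changed: Replaces the running worst-rank integer loop over two rank dicts by building a set of normalized statuses once and returning on two priority membership probes (FAIL, then WARN, else PASS).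
import Mathlib
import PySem

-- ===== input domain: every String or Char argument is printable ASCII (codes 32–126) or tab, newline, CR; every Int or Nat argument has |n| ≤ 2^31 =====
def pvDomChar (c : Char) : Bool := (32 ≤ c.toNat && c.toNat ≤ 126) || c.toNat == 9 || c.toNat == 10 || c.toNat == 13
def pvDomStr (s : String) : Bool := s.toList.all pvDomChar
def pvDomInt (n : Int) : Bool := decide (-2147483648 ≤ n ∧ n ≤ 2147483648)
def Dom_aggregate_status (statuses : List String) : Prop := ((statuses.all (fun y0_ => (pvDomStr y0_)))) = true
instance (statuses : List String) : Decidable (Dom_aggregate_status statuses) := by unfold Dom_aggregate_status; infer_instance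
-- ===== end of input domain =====

-- B builds the set of normalized statuses once and answers by two priority membership probes (idiomatic), instead of A's running worst-rank loop over two rank dicts.


-- ===== PORT A =====
def pvStatusRank : PySem.Dict String Int := PySem.Dict.mk [("PASS", 0), ("WARN", 1), ("FAIL", 2)]
def pvRankToStatus : PySem.Dict Int String := PySem.Dict.mk [(0, "PASS"), (1, "WARN"), (2, "FAIL")]

-- one iteration of A's loop body (rank = _STATUS_RANK.get(str(raw).upper()); skip None; keep the larger)
def pvStepA (worst : Int) (raw : String) : Int :=
  match PySem.Dict.get? pvStatusRank (PySem.Str.upper raw) with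
  | none => worst
  | some rank => if rank > worst then rank else worst

def aggregate_status (statuses : List String) : String :=
  let worst := statuses.foldl pvStepA 0
  -- _RANK_TO_STATUS[worst]: the KeyError branch is unreachable (worst stays in {0,1,2}), so .getD "" is exact
  (PySem.Dict.get? pvRankToStatus worst).getD ""

-- ===== PORT B =====
def aggregate_status_alt (statuses : List String) : String :=
  let s : PySem.Set String := PySem.Set.ofList (statuses.map PySem.Str.upper)
  if PySem.Set.contains s "FAIL" then "FAIL"
  else if PySem.Set.contains s "WARN" then "WARN"
  else "PASS"

-- ===== PRECONDITION & SPEC =====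
def Spec_aggregate_status (statuses : List String) (out : String) : Prop := out = aggregate_status_alt statuses
instance (statuses : List String) (out : String) : Decidable (Spec_aggregate_status statuses out) := by unfold Spec_aggregate_status; infer_instance

-- ===== CLAIM (what is proved, stated in full; the proofs are below) =====
def Claim_equal_aggregate_status : Prop := ∀ (statuses : List String), Dom_aggregate_status statuses → Spec_aggregate_status statuses (aggregate_status statuses)

-- ===== LEMMAS AND PROOFS =====

-- the worst rank of a list, phrased by the memberships B probes
def pvR (l : List String) : Int :=
  if "FAIL" ∈ l.map PySem.Str.upper then 2
  else if "WARN" ∈ l.map PySem.Str.upper then 1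
  else 0

theorem pvR_bounds (l : List String) : 0 ≤ pvR l ∧ pvR l ≤ 2 := by
  unfold pvR; split_ifs <;> omega

theorem pvStepA_eq (w : Int) (a : String) :
    pvStepA w a =
      if PySem.Str.upper a = "FAIL" then max w 2
      else if PySem.Str.upper a = "WARN" then max w 1
      else if PySem.Str.upper a = "PASS" then max w 0
      else w := by
  unfold pvStepA
  by_cases h1 : PySem.Str.upper a = "FAIL"
  · rw [h1, show PySem.Dict.get? pvStatusRank "FAIL" = some 2 from by decide]
    simp; omega
  by_cases h2 : PySem.Str.upper a = "WARN"
  · rw [h2, show PySem.Dict.get? pvStatusRank "WARN" = some 1 from by decide]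
    simp; omega
  by_cases h3 : PySem.Str.upper a = "PASS"
  · rw [h3, show PySem.Dict.get? pvStatusRank "PASS" = some 0 from by decide]
    simp; omega
  · rw [show PySem.Dict.get? pvStatusRank (PySem.Str.upper a) = none from by
      simp [pvStatusRank, PySem.Dict.get?, Ne.symm h1, Ne.symm h2, Ne.symm h3]]
    simp [h1, h2, h3]

theorem pvR_cons (a : String) (l : List String) :
    pvR (a :: l) =
      if PySem.Str.upper a = "FAIL" then 2
      else if PySem.Str.upper a = "WARN" then max 1 (pvR l)
      else pvR l := by
  by_cases h1 : PySem.Str.upper a = "FAIL"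
  · simp [pvR, h1]
  by_cases h2 : PySem.Str.upper a = "WARN"
  · simp only [pvR, List.map_cons, List.mem_cons, h2]
    simp
    split_ifs <;> omega
  · simp [pvR, Ne.symm h1, Ne.symm h2, h1, h2]

theorem pvFold_eq (l : List String) : ∀ (w : Int), 0 ≤ w →
    l.foldl pvStepA w = max w (pvR l) := by
  induction l with
  | nil => intro w hw; simp [pvR]; omega
  | cons a l ih =>
    intro w hw
    have hb := pvR_bounds l
    have hstep : 0 ≤ pvStepA w a := by rw [pvStepA_eq]; split_ifs <;> omega
    rw [List.foldl_cons, ih _ hstep, pvStepA_eq, pvR_cons]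
    split_ifs <;> omega

theorem pvSetContains (l : List String) (x : String) :
    PySem.Set.contains (PySem.Set.ofList l) x = true ↔ x ∈ l := by
  simp [PySem.Set.mem_ofList]

-- ===== VERDICT (by name: the statement is the Claim_ definition above) =====
theorem aggregate_status_spec : Claim_equal_aggregate_status := by
  intro statuses _
  unfold Spec_aggregate_status aggregate_status aggregate_status_alt
  rw [pvFold_eq statuses 0 le_rfl]
  have hF := pvSetContains (statuses.map PySem.Str.upper) "FAIL"
  have hW := pvSetContains (statuses.map PySem.Str.upper) "WARN"
  unfold pvR
  by_cases h1 : "FAIL" ∈ statuses.map PySem.Str.upper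
  · rw [if_pos h1, if_pos (hF.mpr h1), show max (0:Int) 2 = 2 from by norm_num]
    decide
  · rw [if_neg h1, if_neg (fun c => h1 (hF.mp c))]
    by_cases h2 : "WARN" ∈ statuses.map PySem.Str.upper
    · rw [if_pos h2, if_pos (hW.mpr h2), show max (0:Int) 1 = 1 from by norm_num]
      decide
    · rw [if_neg h2, if_neg (fun c => h2 (hW.mp c)), show max (0:Int) 0 = 0 from by norm_num]
      decide
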